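-- pv_equiv track=rewrite | github.com/MrHarcombe/advent_of_code | 2016/day7ab.py | parse_ipv7
-- ===== SOURCE A (Python) =====
-- def parse_ipv7(address):
--     outer = []
--     hypernet = []
--
--     next_bracket = address.find("[")
--     while next_bracket != -1:
--         outer.append(address[:next_bracket])
--         address = address[next_bracket+1:]
--         next_bracket = address.find("]")
--         hypernet.append(address[:next_bracket])
--         address = address[next_bracket+1:]
--         next_bracket = address.find("[")
--     outer.append(address)
--
--     return " ".join(outer), " ".join(hypernet)
-- ===== SOURCE B (Python) =====
-- def parse_ipv7(address):
--     outer = []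
--     hypernet = []
--     buf = []
--     in_bracket = False
--     for c in address:
--         if c == '[' and not in_bracket:
--             outer.append(''.join(buf))
--             buf = []
--             in_bracket = True
--         elif c == ']' and in_bracket:
--             hypernet.append(''.join(buf))
--             buf = []
--             in_bracket = False
--         else:
--             buf.append(c)
--     if in_bracket:
--         hypernet.append(''.join(buf))
--     else:
--         outer.append(''.join(buf))
--     return ' '.join(outer), ' '.join(hypernet)
-- ===== Notes on version B (the rewrite author's own statement) =====
-- stated objective: simpler
-- what changed: Replaces A's repeated find()/slice loop that rebuilds the remaining string each iteration by one left-to-right character scan with an in_bracket flag and a buffer flushed to outer/hypernet as brackets toggle; Pre_ excludes addresses with an opening '[' that has no ']' after it (unbalanced brackets, absent from the puzzle input), where A's find()==-1 handling drops a character and rescans hypernet text while B keeps the unterminated section as hypernet content - an unspecified corner.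
-- outside the precondition, e.g. on parse_ipv7('ab[cd'): A returns ('ab cd', 'c'), B returns ('ab', 'cd'); on parse_ipv7('['): A returns (' ', ''), B returns ('', ''); on parse_ipv7('[['): A returns ('  ', ' '), B returns ('', '[')
import Mathlib
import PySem

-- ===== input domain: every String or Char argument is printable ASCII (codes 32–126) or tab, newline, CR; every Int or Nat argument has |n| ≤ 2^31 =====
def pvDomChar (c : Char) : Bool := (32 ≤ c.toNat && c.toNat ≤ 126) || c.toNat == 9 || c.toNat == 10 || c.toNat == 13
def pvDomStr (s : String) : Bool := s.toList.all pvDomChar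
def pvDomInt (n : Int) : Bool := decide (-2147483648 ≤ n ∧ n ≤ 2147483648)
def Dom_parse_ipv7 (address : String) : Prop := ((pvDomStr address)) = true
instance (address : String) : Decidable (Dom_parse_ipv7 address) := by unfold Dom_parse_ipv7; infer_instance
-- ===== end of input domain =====

-- B replaces A's repeated find()/slice loop by a single left-to-right character scan with an
-- in_bracket flag and a buffer; Pre_ excludes unbalanced-bracket addresses, an unspecified
-- corner where the two parses legitimately differ (return-value equivalence; neither mutates).

-- ===== PORT A =====
-- termination helper for A's while loop: each iteration consumes one '['
theorem pvGoA_dec (l : List Char) (h : ¬ PySem.Chars.find l ['['] = -1) :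
    (PySem.Chars.slice
        (PySem.Chars.slice l (some (PySem.Chars.find l ['['] + 1)) none)
        (some (PySem.Chars.find (PySem.Chars.slice l (some (PySem.Chars.find l ['['] + 1)) none) [']'] + 1)) none).count '['
      < l.count '[' := by
  have hinf : ['['] <:+: l := (PySem.Chars.find_ne_neg_one_iff _ _).mp h
  have h0 : 0 ≤ PySem.Chars.find l ['['] := (PySem.Chars.find_nonneg_iff _ _).mpr hinf
  obtain ⟨hpre, -⟩ := PySem.Chars.find_spec h0
  obtain ⟨r, hr⟩ := hpre
  have ht : PySem.Chars.slice l (some (PySem.Chars.find l ['['] + 1)) none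
      = l.drop ((PySem.Chars.find l ['[']).toNat + 1) := by
    rw [PySem.Chars.slice_eq_listSlice, PySem.List.slice_from _ (by omega)]
    congr 1
    omega
  have hdrop : l.drop ((PySem.Chars.find l ['[']).toNat + 1) = r := by
    have : l.drop ((PySem.Chars.find l ['[']).toNat + 1)
        = (l.drop (PySem.Chars.find l ['[']).toNat).drop 1 := by
      rw [List.drop_drop]
    rw [this, ← hr]
    simp
  have hcount_t : (PySem.Chars.slice l (some (PySem.Chars.find l ['['] + 1)) none).count '[' < l.count '[' := by
    rw [ht, hdrop]
    have hl : l = l.take (PySem.Chars.find l ['[']).toNat ++ ('[' :: r) := by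
      have h2 := List.take_append_drop (PySem.Chars.find l ['[']).toNat l
      rw [← hr] at h2
      simpa using h2.symm
    rw [hl]
    simp [List.count_append]
    omega
  refine lt_of_le_of_lt ?_ hcount_t
  set t := PySem.Chars.slice l (some (PySem.Chars.find l ['['] + 1)) none with ht2
  rw [PySem.Chars.slice_eq_listSlice, PySem.List.slice_some_none]
  exact ((List.drop_sublist _ t).count_le _)

def pvGoA (l : List Char) (outer hyper : List (List Char)) : List (List Char) × List (List Char) :=
  if h : PySem.Chars.find l ['['] = -1 then
    (outer ++ [l], hyper)
  else
    let nb := PySem.Chars.find l ['[']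
    let outer' := outer ++ [PySem.Chars.slice l none (some nb)]
    let t := PySem.Chars.slice l (some (nb + 1)) none
    let nb2 := PySem.Chars.find t [']']
    let hyper' := hyper ++ [PySem.Chars.slice t none (some nb2)]
    let l' := PySem.Chars.slice t (some (nb2 + 1)) none
    pvGoA l' outer' hyper'
termination_by l.count '['
decreasing_by exact pvGoA_dec l h

def parse_ipv7 (address : String) : String × String :=
  let (outer, hyper) := pvGoA address.toList [] []
  (String.ofList (PySem.Chars.join [' '] outer), String.ofList (PySem.Chars.join [' '] hyper))

-- ===== PORT B =====
def pvGoB : List Char → List Char → Bool → List (List Char) → List (List Char) →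
    List (List Char) × List (List Char)
  | [], buf, inb, outer, hyper =>
    if inb = true then (outer, hyper ++ [buf]) else (outer ++ [buf], hyper)
  | c :: rest, buf, inb, outer, hyper =>
    if c = '[' ∧ inb = false then pvGoB rest [] true (outer ++ [buf]) hyper
    else if c = ']' ∧ inb = true then pvGoB rest [] false outer (hyper ++ [buf])
    else pvGoB rest (buf ++ [c]) inb outer hyper

def parse_ipv7_alt (address : String) : String × String :=
  let (outer, hyper) := pvGoB address.toList [] false [] []
  (String.ofList (PySem.Chars.join [' '] outer), String.ofList (PySem.Chars.join [' '] hyper))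

-- ===== PRECONDITION & SPEC =====
-- Pre_ excludes addresses containing an opening '[' with no ']' anywhere after it (unbalanced
-- brackets, never present in the puzzle input this parser is written for): there A's find()==-1
-- handling drops a character and rescans hypernet text as outer text, an accidental value, while
-- B keeps the unterminated section as hypernet content — an unspecified corner where either
-- parse is defensible.
def Pre_parse_ipv7 (address : String) : Prop :=
  ∀ i : Fin address.toList.length,
    address.toList[i] = '[' → ']' ∈ address.toList.drop (i + 1)
instance (address : String) : Decidable (Pre_parse_ipv7 address) := by
  unfold Pre_parse_ipv7; infer_instance

def pvWitness_parse_ipv7 : String := "ab[cd]ef"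

def Spec_parse_ipv7 (address : String) (out : String × String) : Prop := out = parse_ipv7_alt address
instance (address : String) (out : String × String) : Decidable (Spec_parse_ipv7 address out) := by
  unfold Spec_parse_ipv7; infer_instance

-- ===== CLAIM (what is proved, stated in full; the proofs are below) =====
def Claim_equal_parse_ipv7 : Prop :=
  ∀ (address : String), Dom_parse_ipv7 address → Pre_parse_ipv7 address →
    Spec_parse_ipv7 address (parse_ipv7 address)

-- ===== LEMMAS AND PROOFS =====

-- the divergence region of the two algorithms, as a first-split decomposition: Pre_ avoids it
def pvDL (l : List Char) : Prop := ∃ a b, l = a ++ '[' :: b ∧ ']' ∉ b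

theorem pv_not_DL (s : String) (hpre : Pre_parse_ipv7 s) : ¬ pvDL s.toList := by
  rintro ⟨a, b, hl, hb⟩
  have hlen : a.length < s.toList.length := by rw [hl]; simp
  apply hb
  have hget : s.toList[a.length]'hlen = '[' := by simp [hl]
  have hdrop : s.toList.drop (a.length + 1) = b := by
    rw [hl, show a.length + 1 = (a ++ ['[']).length by simp,
        show a ++ '[' :: b = (a ++ ['[']) ++ b by simp]
    exact List.drop_left
  have := hpre ⟨a.length, hlen⟩ hget
  rwa [hdrop] at this

theorem pv_find_singleton_neg (l : List Char) (c : Char) (h : c ∉ l) :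
    PySem.Chars.find l [c] = -1 := by
  apply (PySem.Chars.find_eq_neg_one_iff _ _).mpr
  intro hinf
  exact h (List.singleton_sublist.mp hinf.sublist)

theorem pv_find_singleton_pos (a b : List Char) (c : Char) (h : c ∉ a) :
    PySem.Chars.find (a ++ c :: b) [c] = (a.length : Int) := by
  have hinf : [c] <:+: (a ++ c :: b) := ⟨a, b, by simp⟩
  have h0 : 0 ≤ PySem.Chars.find (a ++ c :: b) [c] := (PySem.Chars.find_nonneg_iff _ _).mpr hinf
  obtain ⟨hpre, hmin⟩ := PySem.Chars.find_spec h0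
  set n := (PySem.Chars.find (a ++ c :: b) [c]).toNat with hn
  have hne : n = a.length := by
    rcases lt_trichotomy n a.length with hlt | heq | hgt
    · exfalso
      obtain ⟨r, hr⟩ := hpre
      have h1 : (List.drop n (a ++ c :: b))[0]? = some c := by
        rw [← hr]; rfl
      have h2 : (a ++ c :: b)[n]? = some c := by
        rw [List.getElem?_drop] at h1
        simpa using h1
      rw [List.getElem?_append_left hlt] at h2
      exact h (List.mem_of_getElem? h2)
    · exact heq
    · exact absurd ⟨b, by simp⟩ (hmin a.length hgt)
  omega

theorem pv_drop_mark (a x : List Char) (c : Char) :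
    (a ++ c :: x).drop (a.length + 1) = x := by
  rw [show a.length + 1 = (a ++ [c]).length by simp,
      show a ++ c :: x = (a ++ [c]) ++ x by simp]
  exact List.drop_left

theorem pvGoA_no_open (l : List Char) (outer hyper : List (List Char)) (h : '[' ∉ l) :
    pvGoA l outer hyper = (outer ++ [l], hyper) := by
  rw [pvGoA]
  simp [pv_find_singleton_neg l '[' h]

theorem pvGoA_step (a u v : List Char) (outer hyper : List (List Char))
    (ha : '[' ∉ a) (hu : ']' ∉ u) :
    pvGoA (a ++ '[' :: (u ++ ']' :: v)) outer hyper
      = pvGoA v (outer ++ [a]) (hyper ++ [u]) := by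
  rw [pvGoA]
  have hf : PySem.Chars.find (a ++ '[' :: (u ++ ']' :: v)) ['['] = (a.length : Int) :=
    pv_find_singleton_pos a (u ++ ']' :: v) '[' ha
  have hne : ¬ PySem.Chars.find (a ++ '[' :: (u ++ ']' :: v)) ['['] = -1 := by
    rw [hf]; omega
  rw [dif_neg hne]
  have htake : PySem.Chars.slice (a ++ '[' :: (u ++ ']' :: v)) none (some (a.length : Int)) = a := by
    rw [PySem.Chars.slice_eq_listSlice, PySem.List.slice_to_natCast]
    exact List.take_left
  have hdrop : PySem.Chars.slice (a ++ '[' :: (u ++ ']' :: v)) (some ((a.length : Int) + 1)) none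
      = u ++ ']' :: v := by
    rw [PySem.Chars.slice_eq_listSlice]
    have : ((a.length : Int) + 1) = ((a.length + 1 : Nat) : Int) := by push_cast; ring
    rw [this, PySem.List.slice_from_natCast]
    exact pv_drop_mark a _ '['
  have hf2 : PySem.Chars.find (u ++ ']' :: v) [']'] = (u.length : Int) :=
    pv_find_singleton_pos u v ']' hu
  have htake2 : PySem.Chars.slice (u ++ ']' :: v) none (some (u.length : Int)) = u := by
    rw [PySem.Chars.slice_eq_listSlice, PySem.List.slice_to_natCast]
    exact List.take_left
  have hdrop2 : PySem.Chars.slice (u ++ ']' :: v) (some ((u.length : Int) + 1)) none = v := by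
    rw [PySem.Chars.slice_eq_listSlice]
    have : ((u.length : Int) + 1) = ((u.length + 1 : Nat) : Int) := by push_cast; ring
    rw [this, PySem.List.slice_from_natCast]
    exact pv_drop_mark u v ']'
  simp only [hf, htake, hdrop, hf2, htake2, hdrop2]

theorem pvGoB_outer_seg (a rest buf : List Char) (outer hyper : List (List Char)) (h : '[' ∉ a) :
    pvGoB (a ++ rest) buf false outer hyper = pvGoB rest (buf ++ a) false outer hyper := by
  induction a generalizing buf with
  | nil => simp
  | cons c cs ih =>
    have hc : ¬ c = '[' := by intro hc; exact h (by simp [hc])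
    rw [List.cons_append]
    show (if c = '[' ∧ false = false then _ else if c = ']' ∧ false = true then _
          else pvGoB (cs ++ rest) (buf ++ [c]) false outer hyper) = _
    rw [if_neg (by simp [hc]), if_neg (by simp)]
    rw [ih (buf ++ [c]) (by intro hm; exact h (List.mem_cons_of_mem _ hm))]
    simp

theorem pvGoB_hyper_seg (u rest buf : List Char) (outer hyper : List (List Char)) (h : ']' ∉ u) :
    pvGoB (u ++ rest) buf true outer hyper = pvGoB rest (buf ++ u) true outer hyper := by
  induction u generalizing buf with
  | nil => simp
  | cons c cs ih =>
    have hc : ¬ c = ']' := by intro hc; exact h (by simp [hc])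
    rw [List.cons_append]
    show (if c = '[' ∧ true = false then _ else if c = ']' ∧ true = true then _
          else pvGoB (cs ++ rest) (buf ++ [c]) true outer hyper) = _
    rw [if_neg (by simp), if_neg (by simp [hc])]
    rw [ih (buf ++ [c]) (by intro hm; exact h (List.mem_cons_of_mem _ hm))]
    simp

theorem pv_first_split {α : Type} [DecidableEq α] (c : α) (l : List α) (h : c ∈ l) :
    ∃ a b, l = a ++ c :: b ∧ c ∉ a := by
  induction l with
  | nil => cases h
  | cons x xs ih =>
    by_cases hx : x = c
    · exact ⟨[], xs, by simp [hx], by simp⟩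
    · have hm : c ∈ xs := by
        rcases List.mem_cons.mp h with h1 | h2
        · exact absurd h1.symm hx
        · exact h2
      obtain ⟨a, b, hab, hna⟩ := ih hm
      exact ⟨x :: a, b, by simp [hab], by
        intro hmem
        rcases List.mem_cons.mp hmem with h1 | h2
        · exact hx h1.symm
        · exact hna h2⟩

-- pvDL is inherited from the tail after a properly closed section
theorem pvDL_of_tail (a u v : List Char) (h : pvDL v) :
    pvDL (a ++ '[' :: (u ++ ']' :: v)) := by
  obtain ⟨a', b', rfl, hb'⟩ := h
  exact ⟨a ++ '[' :: (u ++ ']' :: a'), b', by simp, hb'⟩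

theorem pv_main (N : Nat) : ∀ l : List Char, l.length ≤ N → ¬ pvDL l →
    ∀ outer hyper, pvGoA l outer hyper = pvGoB l [] false outer hyper := by
  induction N with
  | zero =>
    intro l hl _ outer hyper
    have : l = [] := List.length_eq_zero_iff.mp (Nat.le_zero.mp hl)
    subst this
    rw [pvGoA_no_open _ _ _ (by simp)]
    simp [pvGoB]
  | succ N ih =>
    intro l hl hnd outer hyper
    by_cases hmem : '[' ∈ l
    · obtain ⟨a, b, rfl, ha⟩ := pv_first_split '[' l hmem
      have hcl : ']' ∈ b := by
        by_contra hc
        exact hnd ⟨a, b, rfl, hc⟩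
      obtain ⟨u, v, rfl, hu⟩ := pv_first_split ']' b hcl
      rw [pvGoA_step a u v outer hyper ha hu]
      rw [show a ++ '[' :: (u ++ ']' :: v) = a ++ ('[' :: (u ++ ']' :: v)) by simp,
          pvGoB_outer_seg a _ [] outer hyper ha]
      rw [pvGoB, if_pos ⟨rfl, rfl⟩]
      rw [show u ++ ']' :: v = u ++ (']' :: v) by simp,
          pvGoB_hyper_seg u _ [] _ _ hu]
      rw [pvGoB, if_neg (by simp), if_pos ⟨rfl, rfl⟩]
      have hlen : v.length ≤ N := by
        have := hl
        simp [List.length_append] at this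
        omega
      have hndv : ¬ pvDL v := fun hv => hnd (pvDL_of_tail a u v hv)
      have := ih v hlen hndv (outer ++ [a]) (hyper ++ [u])
      simpa using this
    · rw [pvGoA_no_open _ _ _ hmem]
      rw [show l = l ++ [] by simp, pvGoB_outer_seg l [] [] outer hyper hmem]
      simp [pvGoB]

-- A's outer list always grows by at least one segment
-- ===== VERDICT (by name: the statement is the Claim_ definition above) =====
theorem parse_ipv7_spec : Claim_equal_parse_ipv7 := by
  intro address _ hpre
  show parse_ipv7 address = parse_ipv7_alt address
  unfold parse_ipv7 parse_ipv7_alt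
  rw [pv_main address.toList.length address.toList le_rfl (pv_not_DL address hpre) [] []]
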